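-- pv_equiv track=rewrite | github.com/systemsomicslab/msemblator | script/convert_struc_data_type.py | extract_compound_and_ionization
-- ===== SOURCE A (Python) =====
-- def extract_compound_and_ionization(msp_data):
--     lines = msp_data.strip().splitlines()
--     compound_ionization_list = []  # To store tuples of (compound, ionization)
--     spectrum = {"compound": "", "ionization": ""}
--
--     for line in lines:
--         line = line.strip()
--         if line == '':
--             spectrum = {"compound": "", "ionization": ""}
--             continue
--
--         if line.casefold().startswith("name:"):
--             spectrum["compound"] = line.split(':', 1)[1].strip()
--
--         elif line.casefold().startswith("precursortype:"):
--             spectrum["ionization"] = line.split(':', 1)[1].strip()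
--             # Append the (compound, ionization) pair to the list
--             compound_ionization_list.append((spectrum["compound"], spectrum["ionization"]))
--
--     return compound_ionization_list
-- ===== SOURCE B (Python) =====
-- def extract_compound_and_ionization(msp_data):
--     lines = msp_data.strip().splitlines()
--     # First pass: group consecutive non-blank (stripped) lines into record blocks.
--     blocks = []
--     cur = []
--     for line in lines:
--         s = line.strip()
--         if s == '':
--             if cur:
--                 blocks.append(cur)
--                 cur = []
--         else:
--             cur.append(s)
--     if cur:
--         blocks.append(cur)
--     # Second pass: within each block, track the current compound and emit pairs.
--     result = []
--     for block in blocks: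
--         compound = ""
--         for s in block:
--             cf = s.casefold()
--             if cf.startswith("name:"):
--                 compound = s.split(':', 1)[1].strip()
--             elif cf.startswith("precursortype:"):
--                 result.append((compound, s.split(':', 1)[1].strip()))
--     return result
-- ===== Notes on version B (the rewrite author's own statement) =====
-- stated objective: alternative
-- what changed: Replaces A's single flat scan with stateful reset-on-blank by a records-first decomposition: first group consecutive non-blank lines into blocks, then process each block with a fresh compound accumulator.
import Mathlib
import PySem

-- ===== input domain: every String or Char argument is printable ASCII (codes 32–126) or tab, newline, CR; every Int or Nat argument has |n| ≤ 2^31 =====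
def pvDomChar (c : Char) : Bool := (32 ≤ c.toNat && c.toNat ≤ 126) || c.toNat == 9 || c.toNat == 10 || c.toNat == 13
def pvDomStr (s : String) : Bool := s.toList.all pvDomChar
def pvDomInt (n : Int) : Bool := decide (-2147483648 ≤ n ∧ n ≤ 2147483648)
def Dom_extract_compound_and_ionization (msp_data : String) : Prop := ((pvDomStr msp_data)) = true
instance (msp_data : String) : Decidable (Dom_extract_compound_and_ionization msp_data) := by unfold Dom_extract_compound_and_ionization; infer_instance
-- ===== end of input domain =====

-- B reshapes A's flat reset-on-blank scan into a records-first decomposition (group non-blank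
-- lines into blocks, then a per-block pass); objective: alternative, same cost.
-- 'casefold' is ported as PySem.Str.lower, exact on the ASCII domain Dom_.

-- line.split(':', 1)[1].strip()  — the identical subexpression of both Pythons
def pvAfterColon (line : String) : String :=
  PySem.Str.strip (PySem.List.pyGetD ((PySem.Str.splitMax? line ":" 1).getD []) 1 "")

-- ===== PORT A =====
-- one step of A's loop; state = (compound_ionization_list, compound, ionization)
def pvStepA (st : List (String × String) × String × String) (line : String) :
    List (String × String) × String × String :=
  let l := PySem.Str.strip line
  if l = "" then (st.1, "", "")
  else if PySem.Str.startswith (PySem.Str.lower l) "name:" then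
    (st.1, pvAfterColon l, st.2.2)
  else if PySem.Str.startswith (PySem.Str.lower l) "precursortype:" then
    (st.1 ++ [(st.2.1, pvAfterColon l)], st.2.1, pvAfterColon l)
  else st

def extract_compound_and_ionization (msp_data : String) : List (String × String) :=
  ((PySem.Str.splitlines (PySem.Str.strip msp_data)).foldl pvStepA ([], "", "")).1

-- ===== PORT B =====
-- first pass of B: group consecutive non-blank (stripped) lines into blocks
def pvSplitBlocks (cur : List String) : List String → List (List String)
  | [] => if cur = [] then [] else [cur]
  | l :: ls =>
    if PySem.Str.strip l = "" then
      if cur = [] then pvSplitBlocks [] ls else cur :: pvSplitBlocks [] ls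
    else pvSplitBlocks (cur ++ [PySem.Str.strip l]) ls

-- one step of B's inner loop; state = (result, compound); block lines are pre-stripped
def pvStepB (st : List (String × String) × String) (s : String) :
    List (String × String) × String :=
  let cf := PySem.Str.lower s
  if PySem.Str.startswith cf "name:" then (st.1, pvAfterColon s)
  else if PySem.Str.startswith cf "precursortype:" then
    (st.1 ++ [(st.2, pvAfterColon s)], st.2)
  else st

def extract_compound_and_ionization_alt (msp_data : String) : List (String × String) :=
  let lines := PySem.Str.splitlines (PySem.Str.strip msp_data)
  let blocks := pvSplitBlocks [] lines
  blocks.foldl (fun res block => (block.foldl pvStepB (res, "")).1) []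

-- ===== PRECONDITION & SPEC =====
def Spec_extract_compound_and_ionization (msp_data : String) (out : List (String × String)) : Prop := out = extract_compound_and_ionization_alt msp_data
instance (msp_data : String) (out : List (String × String)) : Decidable (Spec_extract_compound_and_ionization msp_data out) := by unfold Spec_extract_compound_and_ionization; infer_instance

-- ===== CLAIM (what is proved, stated in full; the proofs are below) =====
def Claim_equal_extract_compound_and_ionization : Prop := ∀ (msp_data : String), Dom_extract_compound_and_ionization msp_data → Spec_extract_compound_and_ionization msp_data (extract_compound_and_ionization msp_data)

-- ===== LEMMAS AND PROOFS =====

-- A's step on a non-blank line agrees with B's step on the stripped line (on the first two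
-- state components; A's third component is the ionization field, which is never read).
theorem pvStepA_nonblank (acc : List (String × String)) (comp ion : String) (l : String)
    (h : PySem.Str.strip l ≠ "") :
    ((pvStepA (acc, comp, ion) l).1, (pvStepA (acc, comp, ion) l).2.1)
      = pvStepB (acc, comp) (PySem.Str.strip l) := by
  simp only [pvStepA, pvStepB, h, if_false]
  split_ifs <;> rfl

-- main invariant: if folding the already-consumed (stripped) lines `cur` of the current block
-- with B's step from (acc0, "") yields A's current state (acc, comp), then A's flat scan of the
-- remaining lines equals B's per-block processing of `pvSplitBlocks cur lines` from acc0.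
theorem pv_main (lines : List String) : ∀ (cur : List String)
    (acc0 acc : List (String × String)) (comp ion : String),
    cur.foldl pvStepB (acc0, "") = (acc, comp) →
    (lines.foldl pvStepA (acc, comp, ion)).1
      = (pvSplitBlocks cur lines).foldl (fun res block => (block.foldl pvStepB (res, "")).1) acc0 := by
  induction lines with
  | nil =>
    intro cur acc0 acc comp ion h
    simp only [List.foldl_nil, pvSplitBlocks]
    split_ifs with hc
    · subst hc; simp only [List.foldl_nil] at h
      exact (congrArg Prod.fst h).symm
    · simp [h]
  | cons l ls ih =>
    intro cur acc0 acc comp ion h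
    by_cases hb : PySem.Str.strip l = ""
    · have hstep : pvStepA (acc, comp, ion) l = (acc, "", "") := by
        simp [pvStepA, hb]
      simp only [List.foldl_cons, hstep, pvSplitBlocks, hb, if_true]
      have ih' := ih [] acc acc "" "" (by simp)
      split_ifs with hc
      · subst hc; simp only [List.foldl_nil] at h
        rw [ih']
        have : acc0 = acc := by
          have := congrArg Prod.fst h; simpa using this
        rw [this]
      · rw [ih']
        simp only [List.foldl_cons]
        rw [h]
    · have hstep := pvStepA_nonblank acc comp ion l hb
      have hcur : (cur ++ [PySem.Str.strip l]).foldl pvStepB (acc0, "")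
          = ((pvStepA (acc, comp, ion) l).1, (pvStepA (acc, comp, ion) l).2.1) := by
        rw [List.foldl_append, h]
        simp only [List.foldl_cons, List.foldl_nil]
        rw [hstep]
      have ih' := ih (cur ++ [PySem.Str.strip l]) acc0
        (pvStepA (acc, comp, ion) l).1 (pvStepA (acc, comp, ion) l).2.1
        (pvStepA (acc, comp, ion) l).2.2 hcur
      simp only [List.foldl_cons, pvSplitBlocks, hb, if_false]
      rw [← ih']

-- ===== VERDICT (by name: the statement is the Claim_ definition above) =====
theorem extract_compound_and_ionization_spec : Claim_equal_extract_compound_and_ionization := by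
  intro msp_data _
  unfold Spec_extract_compound_and_ionization extract_compound_and_ionization
    extract_compound_and_ionization_alt
  exact pv_main _ [] [] [] "" "" (by simp)
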